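-- pv_equiv track=rewrite | github.com/stryz-0709/epic-treeinfo-dart | scripts/export_patrol_event_schemas.py | _extract_top_level_object_keys
-- ===== SOURCE A (Python) =====
-- def _extract_top_level_object_keys(obj_block: str) -> list[str]:
--     keys: list[str] = []
--     depth = 0
--     i = 0
--     n = len(obj_block)
--     in_str = False
--     esc = False
--
--     while i < n:
--         ch = obj_block[i]
--
--         if in_str:
--             if esc:
--                 esc = False
--             elif ch == "\\":
--                 esc = True
--             elif ch == '"':
--                 in_str = False
--             i += 1
--             continue
--
--         if ch == '"':
--             i += 1
--             key_chars: list[str] = []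
--             esc2 = False
--             while i < n:
--                 c2 = obj_block[i]
--                 if esc2:
--                     key_chars.append(c2)
--                     esc2 = False
--                 elif c2 == "\\":
--                     esc2 = True
--                 elif c2 == '"':
--                     break
--                 else:
--                     key_chars.append(c2)
--                 i += 1
--
--             key = "".join(key_chars)
--             i += 1
--
--             if depth == 1:
--                 j = i
--                 while j < n and obj_block[j].isspace():
--                     j += 1
--                 if j < n and obj_block[j] == ':':
--                     keys.append(key)
--             continue
--
--         if ch == '{':
--             depth += 1
--         elif ch == '}':
--             depth -= 1
--
--         i += 1
--
--     return sorted(list(dict.fromkeys(keys)))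
-- ===== SOURCE B (Python) =====
-- def _extract_top_level_object_keys(obj_block: str) -> list[str]:
--     # Pass 1: tokenize the whole input into a flat token list.
--     tokens: list[tuple[str, str]] = []
--     i = 0
--     n = len(obj_block)
--     while i < n:
--         ch = obj_block[i]
--         if ch == '"':
--             i += 1
--             chars: list[str] = []
--             esc = False
--             while i < n:
--                 c = obj_block[i]
--                 if esc:
--                     chars.append(c)
--                     esc = False
--                 elif c == "\\":
--                     esc = True
--                 elif c == '"':
--                     break
--                 else:
--                     chars.append(c)
--                 i += 1
--             i += 1
--             tokens.append(("str", "".join(chars)))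
--         elif ch in "{}:":
--             tokens.append((ch, ""))
--             i += 1
--         elif ch.isspace():
--             tokens.append(("ws", ""))
--             i += 1
--         else:
--             tokens.append(("other", ""))
--             i += 1
--
--     # Pass 2: walk the token list with a depth counter; a string token at
--     # depth 1 whose next significant token is ':' is a top-level key.
--     keys: list[str] = []
--     depth = 0
--     for idx, (kind, val) in enumerate(tokens):
--         if kind == "{":
--             depth += 1
--         elif kind == "}":
--             depth -= 1
--         elif kind == "str" and depth == 1:
--             j = idx + 1
--             while j < len(tokens) and tokens[j][0] == "ws":
--                 j += 1
--             if j < len(tokens) and tokens[j][0] == ":":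
--                 keys.append(val)
--     return sorted(dict.fromkeys(keys))
-- ===== Notes on version B (the rewrite author's own statement) =====
-- stated objective: alternative
-- what changed: B first materializes a flat token list (decoded strings, structural chars, whitespace markers) in one tokenizing pass, then a second pass over the tokens maintains the depth counter and looks ahead past whitespace tokens for ':', instead of A's single inline character scan with an in-place char lookahead.
import Mathlib
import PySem

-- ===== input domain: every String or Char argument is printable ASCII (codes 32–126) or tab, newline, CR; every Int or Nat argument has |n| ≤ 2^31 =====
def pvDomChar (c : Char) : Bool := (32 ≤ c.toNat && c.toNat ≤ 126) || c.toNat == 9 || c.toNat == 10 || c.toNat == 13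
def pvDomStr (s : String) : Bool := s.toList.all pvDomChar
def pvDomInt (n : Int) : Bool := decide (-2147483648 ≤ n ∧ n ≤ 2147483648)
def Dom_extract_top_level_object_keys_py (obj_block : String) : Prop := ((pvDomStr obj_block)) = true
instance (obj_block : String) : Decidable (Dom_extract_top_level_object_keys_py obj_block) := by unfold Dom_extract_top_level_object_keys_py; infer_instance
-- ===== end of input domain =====

-- B re-decomposes A's single inline scan as tokenize-then-depth-pass; same return value, no speed claim.

-- ===== PORT A =====
-- A's inner while loop reading a quoted key (escape drops the backslash, keeps the next char);
-- returns (key chars, remainder after the closing quote; [] if unterminated).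
def pvAReadKey : List Char → Bool → List Char → (List Char × List Char)
  | [], _, acc => (acc, [])
  | c :: rest, esc2, acc =>
    if esc2 then pvAReadKey rest false (acc ++ [c])
    else if c == '\\' then pvAReadKey rest true acc
    else if c == '"' then (acc, rest)
    else pvAReadKey rest false (acc ++ [c])

-- A's whitespace lookahead: skip isspace chars, test whether the next char is ':'.
def pvALookColon : List Char → Bool
  | [] => false
  | c :: rest => if PySem.Chars.isspace c then pvALookColon rest else c == ':'

-- A's main while loop (in_str/esc carried exactly as in the source, though never set);
-- fuel is a totality guard only: each step consumes at least one character, fuel = length suffices.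
def pvALoop : Nat → List Char → Int → Bool → Bool → List String → List String
  | _, [], _, _, _, keys => keys
  | 0, _ :: _, _, _, _, keys => keys
  | fuel + 1, ch :: rest, depth, in_str, esc, keys =>
    if in_str then
      if esc then pvALoop fuel rest depth in_str false keys
      else if ch == '\\' then pvALoop fuel rest depth in_str true keys
      else if ch == '"' then pvALoop fuel rest depth false esc keys
      else pvALoop fuel rest depth in_str esc keys
    else if ch == '"' then
      if depth == 1 then
        if pvALookColon (pvAReadKey rest false []).2 then
          pvALoop fuel (pvAReadKey rest false []).2 depth in_str esc
            (keys ++ [String.ofList (pvAReadKey rest false []).1])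
        else pvALoop fuel (pvAReadKey rest false []).2 depth in_str esc keys
      else pvALoop fuel (pvAReadKey rest false []).2 depth in_str esc keys
    else if ch == '{' then pvALoop fuel rest (depth + 1) in_str esc keys
    else if ch == '}' then pvALoop fuel rest (depth - 1) in_str esc keys
    else pvALoop fuel rest depth in_str esc keys

def extract_top_level_object_keys_py (obj_block : String) : List String :=
  PySem.List.sorted (PySem.List.dedup (pvALoop obj_block.toList.length obj_block.toList 0 false false []))
    (fun x => x) false

-- ===== PORT B =====
inductive PvTok where
  | str : String → PvTok
  | openB : PvTok
  | closeB : PvTok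
  | colon : PvTok
  | ws : PvTok
  | other : PvTok
deriving DecidableEq, Repr

-- Source B's inner quoted-string reader (same escape rule as A's).
def pvBReadKey : List Char → Bool → List Char → (List Char × List Char)
  | [], _, acc => (acc, [])
  | c :: rest, esc, acc =>
    if esc then pvBReadKey rest false (acc ++ [c])
    else if c == '\\' then pvBReadKey rest true acc
    else if c == '"' then (acc, rest)
    else pvBReadKey rest false (acc ++ [c])

-- Pass 1: the token list (fuel is a totality guard only; fuel = length suffices).
def pvBTokenize : Nat → List Char → List PvTok
  | _, [] => []
  | 0, _ :: _ => []
  | fuel + 1, ch :: rest =>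
    if ch == '"' then
      PvTok.str (String.ofList (pvBReadKey rest false []).1)
        :: pvBTokenize fuel (pvBReadKey rest false []).2
    else if ch == '{' then PvTok.openB :: pvBTokenize fuel rest
    else if ch == '}' then PvTok.closeB :: pvBTokenize fuel rest
    else if ch == ':' then PvTok.colon :: pvBTokenize fuel rest
    else if PySem.Chars.isspace ch then PvTok.ws :: pvBTokenize fuel rest
    else PvTok.other :: pvBTokenize fuel rest

-- lookahead in pass 2: next non-ws token is ':'.
def pvBNextSig : List PvTok → Bool
  | [] => false
  | PvTok.ws :: rest => pvBNextSig rest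
  | t :: _ => t == PvTok.colon

-- Pass 2: depth counter over the token list.
def pvBPass2 : List PvTok → Int → List String → List String
  | [], _, keys => keys
  | t :: rest, depth, keys =>
    match t with
    | PvTok.openB => pvBPass2 rest (depth + 1) keys
    | PvTok.closeB => pvBPass2 rest (depth - 1) keys
    | PvTok.str v =>
      if depth == 1 && pvBNextSig rest then pvBPass2 rest depth (keys ++ [v])
      else pvBPass2 rest depth keys
    | _ => pvBPass2 rest depth keys

def extract_top_level_object_keys_py_alt (obj_block : String) : List String :=
  PySem.List.sorted (PySem.List.dedup (pvBPass2 (pvBTokenize obj_block.toList.length obj_block.toList) 0 []))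
    (fun x => x) false

-- ===== PRECONDITION & SPEC =====
def Spec_extract_top_level_object_keys_py (obj_block : String) (out : List String) : Prop := out = extract_top_level_object_keys_py_alt obj_block
instance (obj_block : String) (out : List String) : Decidable (Spec_extract_top_level_object_keys_py obj_block out) := by unfold Spec_extract_top_level_object_keys_py; infer_instance

-- ===== CLAIM (what is proved, stated in full; the proofs are below) =====
def Claim_equal_extract_top_level_object_keys_py : Prop := ∀ (obj_block : String), Dom_extract_top_level_object_keys_py obj_block → Spec_extract_top_level_object_keys_py obj_block (extract_top_level_object_keys_py obj_block)

-- ===== LEMMAS AND PROOFS =====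
theorem pvAReadKey_len (cs : List Char) : ∀ (e : Bool) (a : List Char),
    (pvAReadKey cs e a).2.length ≤ cs.length := by
  induction cs with
  | nil => intro e a; simp [pvAReadKey]
  | cons c rest ih =>
    intro e a
    simp only [pvAReadKey]
    split_ifs <;> simp <;> exact Nat.le_succ_of_le (ih _ _)

theorem pvReadKey_eq (cs : List Char) : ∀ (e : Bool) (a : List Char),
    pvBReadKey cs e a = pvAReadKey cs e a := by
  induction cs with
  | nil => intro e a; rfl
  | cons c rest ih =>
    intro e a
    simp only [pvAReadKey, pvBReadKey]
    split_ifs <;> first | rfl | exact ih _ _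

theorem pvNextSig_eq : ∀ (fuel : Nat) (cs : List Char), cs.length ≤ fuel →
    pvBNextSig (pvBTokenize fuel cs) = pvALookColon cs := by
  intro fuel
  induction fuel with
  | zero =>
    intro cs h
    have hnil : cs = [] := List.eq_nil_of_length_eq_zero (Nat.le_zero.mp h)
    subst hnil; rfl
  | succ n ih =>
    intro cs h
    cases cs with
    | nil => rfl
    | cons c rest =>
      have hr : rest.length ≤ n := Nat.succ_le_succ_iff.mp (by simpa using h)
      by_cases h1 : c = '"'
      · subst h1
        simp [pvBTokenize, pvALookColon, pvBNextSig, (by decide : PySem.Chars.isspace '"' = false)]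
      · by_cases h2 : c = '{'
        · subst h2
          simp [pvBTokenize, pvALookColon, pvBNextSig, (by decide : PySem.Chars.isspace '{' = false)]
        · by_cases h3 : c = '}'
          · subst h3
            simp [pvBTokenize, pvALookColon, pvBNextSig, (by decide : PySem.Chars.isspace '}' = false)]
          · by_cases h4 : c = ':'
            · subst h4
              simp [pvBTokenize, pvALookColon, pvBNextSig, (by decide : PySem.Chars.isspace ':' = false)]
            · by_cases h5 : PySem.Chars.isspace c = true
              · simp [pvBTokenize, pvALookColon, pvBNextSig, h1, h2, h3, h4, h5, ih rest hr]
              · simp [pvBTokenize, pvALookColon, pvBNextSig, h1, h2, h3, h4, h5]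

theorem pvMain : ∀ (fuel : Nat) (cs : List Char), cs.length ≤ fuel →
    ∀ (depth : Int) (keys : List String),
      pvBPass2 (pvBTokenize fuel cs) depth keys = pvALoop fuel cs depth false false keys := by
  intro fuel
  induction fuel with
  | zero =>
    intro cs h depth keys
    have hnil : cs = [] := List.eq_nil_of_length_eq_zero (Nat.le_zero.mp h)
    subst hnil; rfl
  | succ n ih =>
    intro cs h depth keys
    cases cs with
    | nil => rfl
    | cons ch rest =>
      have hr : rest.length ≤ n := Nat.succ_le_succ_iff.mp (by simpa using h)
      by_cases h1 : ch = '"'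
      · subst h1
        have hk : (pvAReadKey rest false []).2.length ≤ n :=
          le_trans (pvAReadKey_len _ _ _) hr
        cases hb : ((depth == 1) : Bool) <;>
          cases hc : pvALookColon (pvAReadKey rest false []).2 <;>
            simp [pvBTokenize, pvALoop, pvBPass2, pvReadKey_eq, pvNextSig_eq n _ hk, hb, hc] <;>
              exact ih _ hk _ _
      · by_cases h2 : ch = '{'
        · subst h2
          simp [pvBTokenize, pvALoop, pvBPass2]
          exact ih rest hr _ _
        · by_cases h3 : ch = '}'
          · subst h3
            simp [pvBTokenize, pvALoop, pvBPass2]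
            exact ih rest hr _ _
          · by_cases h4 : ch = ':'
            · subst h4
              simp [pvBTokenize, pvALoop, pvBPass2]
              exact ih rest hr _ _
            · by_cases h5 : PySem.Chars.isspace ch = true
              · simp [pvBTokenize, pvALoop, pvBPass2, h1, h2, h3, h4, h5]
                exact ih rest hr _ _
              · simp [pvBTokenize, pvALoop, pvBPass2, h1, h2, h3, h4, h5]
                exact ih rest hr _ _

-- ===== VERDICT (by name: the statement is the Claim_ definition above) =====
theorem extract_top_level_object_keys_py_spec : Claim_equal_extract_top_level_object_keys_py := by
  intro s _
  unfold Spec_extract_top_level_object_keys_py extract_top_level_object_keys_py extract_top_level_object_keys_py_alt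
  rw [pvMain s.toList.length s.toList le_rfl]
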